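-- pv_equiv track=rewrite | github.com/Lior8/EvolutionaryTetris | bot/feature_extraction.py | extract_heights_and_holes
-- ===== SOURCE A (Python) =====
-- def extract_heights_and_holes(board):
--     """
--     Calculates the:
--     Max height - Highest non-empty column (height is the tallest non-empty block)
--     Cumulative height - sum of the height of each column
--     Relative height - difference between the highest and lowest columns
--     Holes - Hole is defined as an empty block with non-empty block somewhere above it in the column
--     Roughness - Difference between each column and its right neighbor
--     :param board: The game board
--     :return: Feature vector
--     """
--     board_height = len(board)
--     board_width = len(board[0])
--     heights = [-1] * board_width
--     holes = 0
--     for col in range(board_width):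
--         for row in range(board_height):
--             if heights[col] < 0:
--                 if board[row][col] > 0:
--                     heights[col] = board_height - row
--             else:
--                 if board[row][col] == 0:
--                     holes += 1
--         if heights[col] < 0:
--             heights[col] = 0
--
--     roughness = 0
--     for i in range(board_width - 1):
--         roughness += abs(heights[i + 1] - heights[i])
--     height = max(heights)
--     rel_height = height - min(heights)
--     cum_height = sum(heights)
--     return height, cum_height, rel_height, holes, roughness
-- ===== SOURCE B (Python) =====
-- def extract_heights_and_holes(board):
--     board_height = len(board)
--     board_width = len(board[0])
--     # pass 1: column heights via first filled cell (top-down, break at first hit)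
--     heights = []
--     for col in range(board_width):
--         h = 0
--         for row in range(board_height):
--             if board[row][col] > 0:
--                 h = board_height - row
--                 break
--         heights.append(h)
--     # pass 2: holes = empty (== 0) cells strictly below the column's top block
--     holes = 0
--     for col in range(board_width):
--         h = heights[col]
--         if h > 0:
--             for row in range(board_height - h + 1, board_height):
--                 if board[row][col] == 0:
--                     holes += 1
--     roughness = sum(abs(heights[i + 1] - heights[i]) for i in range(board_width - 1))
--     height = max(heights)
--     return height, sum(heights), height - min(heights), holes, roughness
-- ===== Notes on version B (the rewrite author's own statement) =====
-- stated objective: simpler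
-- what changed: Replaces A's fused single scan per column (a -1 sentinel in heights[] switching the same row loop between height-finding and hole-counting) with two separate passes: first compute each column's height by finding the first filled cell and breaking, then count holes by scanning only the cells below each column's top.
import Mathlib
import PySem

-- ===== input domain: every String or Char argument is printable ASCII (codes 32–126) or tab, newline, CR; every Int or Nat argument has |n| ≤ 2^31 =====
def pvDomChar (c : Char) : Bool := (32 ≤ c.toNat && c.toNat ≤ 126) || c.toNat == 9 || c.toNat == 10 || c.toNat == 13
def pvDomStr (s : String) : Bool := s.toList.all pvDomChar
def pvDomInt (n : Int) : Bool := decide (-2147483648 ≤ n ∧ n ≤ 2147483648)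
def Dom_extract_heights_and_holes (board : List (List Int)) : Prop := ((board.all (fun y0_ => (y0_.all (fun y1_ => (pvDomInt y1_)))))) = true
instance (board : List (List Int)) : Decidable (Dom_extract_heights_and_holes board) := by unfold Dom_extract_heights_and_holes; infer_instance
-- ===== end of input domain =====

-- B replaces A's fused single pass (a -1 sentinel flag choosing between height-setting and
-- hole-counting inside one row loop) by two separate passes: first the column heights (first
-- filled cell, break), then the holes (count zeros below each column top); objective: simpler
-- decomposition, same cost.

-- ===== PORT A =====
-- shared cell accessor: board[row][col] (indices always in range on Pre_)
def pvCell (board : List (List Int)) (r c : Nat) : Int := (board.getD r []).getD c 0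

-- body of A's inner `for row in range(board_height)` loop
def pvStepRowA (board : List (List Int)) (bh c : Nat) (st2 : List Int × Int) (r : Nat) :
    List Int × Int :=
  if st2.1.getD c 0 < 0 then
    if pvCell board r c > 0 then (st2.1.set c ((bh : Int) - (r : Int)), st2.2) else st2
  else
    if pvCell board r c = 0 then (st2.1, st2.2 + 1) else st2

-- body of A's outer `for col in range(board_width)` loop
def pvStepColA (board : List (List Int)) (bh : Nat) (st : List Int × Int) (c : Nat) :
    List Int × Int :=
  let inner := (List.range bh).foldl (pvStepRowA board bh c) st
  if inner.1.getD c 0 < 0 then (inner.1.set c 0, inner.2) else inner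

def extract_heights_and_holes (board : List (List Int)) : Int × Int × Int × Int × Int :=
  let bh := board.length
  let bw := (board.headD []).length
  let st := (List.range bw).foldl (pvStepColA board bh) (List.replicate bw (-1 : Int), (0 : Int))
  let heights := st.1
  let holes := st.2
  let roughness := (List.range (bw - 1)).foldl
    (fun acc i => acc + |heights.getD (i + 1) 0 - heights.getD i 0|) (0 : Int)
  let height := (PySem.List.max? heights (fun y => y)).getD 0
  (height, heights.sum, height - (PySem.List.min? heights (fun y => y)).getD 0, holes, roughness)

-- ===== PORT B =====
-- pass 1 helper: height of one column = bh - (first row with a cell > 0), else 0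
def pvColHeight (board : List (List Int)) (bh c : Nat) : Int :=
  match (List.range bh).find? (fun r => decide (pvCell board r c > 0)) with
  | some r => (bh : Int) - (r : Int)
  | none => 0

-- pass 2 helper: zeros strictly below the column top, rows range(bh - h + 1, bh)
def pvColHoles (board : List (List Int)) (bh c : Nat) (h : Int) : Int :=
  (PySem.List.pyRange ((bh : Int) - h + 1) (bh : Int) 1).foldl
    (fun acc r => if pvCell board r.toNat c = 0 then acc + 1 else acc) 0

def extract_heights_and_holes_alt (board : List (List Int)) : Int × Int × Int × Int × Int :=
  let bh := board.length
  let bw := (board.headD []).length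
  let heights := (List.range bw).map (pvColHeight board bh)
  let holes := (List.range bw).foldl
    (fun acc c =>
      let h := heights.getD c 0
      if h > 0 then acc + pvColHoles board bh c h else acc) (0 : Int)
  let roughness := (List.range (bw - 1)).foldl
    (fun acc i => acc + |heights.getD (i + 1) 0 - heights.getD i 0|) (0 : Int)
  let height := (PySem.List.max? heights (fun y => y)).getD 0
  (height, heights.sum, height - (PySem.List.min? heights (fun y => y)).getD 0, holes, roughness)

-- ===== PRECONDITION & SPEC =====
-- Pre_ excludes exactly the inputs where A raises: an empty board (board[0] IndexError),
-- a board whose first row is empty (max([]) ValueError), and rows shorter than the first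
-- row's width (IndexError while scanning a column).
def Pre_extract_heights_and_holes (board : List (List Int)) : Prop :=
  board ≠ [] ∧ 0 < (board.headD []).length ∧
    ∀ row ∈ board, (board.headD []).length ≤ row.length

instance (board : List (List Int)) : Decidable (Pre_extract_heights_and_holes board) := by
  unfold Pre_extract_heights_and_holes; infer_instance

def pvWitness_extract_heights_and_holes : List (List Int) := [[1, 0], [0, 2]]

def Spec_extract_heights_and_holes (board : List (List Int)) (out : Int × Int × Int × Int × Int) : Prop := out = extract_heights_and_holes_alt board
instance (board : List (List Int)) (out : Int × Int × Int × Int × Int) : Decidable (Spec_extract_heights_and_holes board out) := by unfold Spec_extract_heights_and_holes; infer_instance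

-- ===== CLAIM (what is proved, stated in full; the proofs are below) =====
def Claim_equal_extract_heights_and_holes : Prop := ∀ (board : List (List Int)), Dom_extract_heights_and_holes board → Pre_extract_heights_and_holes board → Spec_extract_heights_and_holes board (extract_heights_and_holes board)

-- ===== LEMMAS AND PROOFS =====

-- B's per-column hole contribution (0 for an empty column)
def pvContrib (board : List (List Int)) (bh c : Nat) : Int :=
  if pvColHeight board bh c > 0 then pvColHoles board bh c (pvColHeight board bh c) else 0

theorem pvCountBridge (a b : Nat) (p : Nat → Bool) (init : Int) :
    (PySem.List.pyRange (a : Int) (b : Int) 1).foldl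
      (fun acc r => if p r.toNat then acc + 1 else acc) init
    = init + ((List.range' a (b - a)).countP p : Int) := by
  rw [PySem.List.pyRange_one, Int.toNat_sub, List.foldl_map, List.range'_eq_map_range,
    List.countP_map]
  have h : ∀ k : Nat, ((a : Int) + (k : Nat)).toNat = a + k := by intro k; omega
  calc List.foldl (fun acc k => if p ((a:Int) + (k:Nat)).toNat then acc + 1 else acc) init
        (List.range (b - a))
      = List.foldl (fun acc k => if (p ∘ (fun x => a + x)) k then acc + 1 else acc) init
        (List.range (b - a)) := by
        apply PySem.List.foldl_congr_mem
        intro acc k _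
        simp [h k]
    _ = init + _ := PySem.List.foldl_count_if _ _ _

theorem pvInnerScan (board : List (List Int)) (bh c : Nat) :
    ∀ (n i : Nat) (hs : List Int) (holes : Int), ¬ hs.getD c 0 < 0 →
      (List.range' i n).foldl (pvStepRowA board bh c) (hs, holes)
      = (hs, holes + ((List.range' i n).countP (fun r => decide (pvCell board r c = 0)) : Int)) := by
  intro n
  induction n with
  | zero => intro i hs holes h; simp
  | succ n ih =>
    intro i hs holes h
    rw [List.range'_succ, List.foldl_cons]
    have hstep : pvStepRowA board bh c (hs, holes) i
        = (hs, if pvCell board i c = 0 then holes + 1 else holes) := by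
      simp only [pvStepRowA, if_neg h]
      split <;> simp
    rw [hstep]
    split
    · rw [ih (i+1) hs (holes+1) h]
      simp_all
      ring
    · rw [ih (i+1) hs holes h]
      simp_all

theorem pvInnerSearch (board : List (List Int)) (bh c : Nat) :
    ∀ (n i : Nat) (hs : List Int) (holes : Int), hs.getD c 0 = -1 → c < hs.length → i + n ≤ bh →
      (List.range' i n).foldl (pvStepRowA board bh c) (hs, holes)
      = match (List.range' i n).find? (fun r => decide (pvCell board r c > 0)) with
        | none => (hs, holes)
        | some r0 => (hs.set c ((bh : Int) - (r0 : Int)),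
            holes + ((List.range' (r0 + 1) (i + n - (r0 + 1))).countP
                       (fun r => decide (pvCell board r c = 0)) : Int)) := by
  intro n
  induction n with
  | zero => intro i hs holes hv hc hb; simp
  | succ n ih =>
    intro i hs holes hv hc hb
    rw [List.range'_succ, List.foldl_cons, List.find?_cons]
    have hneg : hs.getD c 0 < 0 := by omega
    by_cases hp : pvCell board i c > 0
    · have hstep : pvStepRowA board bh c (hs, holes) i
          = (hs.set c ((bh : Int) - (i : Int)), holes) := by
        simp only [pvStepRowA]; rw [if_pos hneg, if_pos hp]
      rw [hstep]
      have hnn : ¬ (hs.set c ((bh : Int) - (i : Int))).getD c 0 < 0 := by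
        rw [show (hs.set c ((bh : Int) - (i : Int))).getD c 0 = (bh : Int) - (i : Int) from by
          simp [List.getD, hc]]
        omega
      rw [pvInnerScan board bh c n (i+1) _ holes hnn]
      have hd : (decide (pvCell board i c > 0)) = true := by simp [hp]
      rw [hd]
      dsimp only
      rw [show i + (n+1) - (i+1) = n from by omega]
    · have hstep : pvStepRowA board bh c (hs, holes) i = (hs, holes) := by
        simp only [pvStepRowA]; rw [if_pos hneg, if_neg hp]
      rw [hstep]
      rw [ih (i+1) hs holes hv hc (by omega)]
      rw [show i + 1 + n = i + (n+1) from by omega]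
      have : (decide (pvCell board i c > 0)) = false := by simp [hp]
      rw [this]

theorem pvColStep (board : List (List Int)) (bh c : Nat) (hs : List Int) (holes : Int)
    (hc : c < hs.length) (hv : hs.getD c 0 = -1) :
    pvStepColA board bh (hs, holes) c
    = (hs.set c (pvColHeight board bh c), holes + pvContrib board bh c) := by
  unfold pvStepColA
  rw [List.range_eq_range']
  rw [pvInnerSearch board bh c bh 0 hs holes hv hc (by omega)]
  cases hfind : (List.range' 0 bh).find? (fun r => decide (pvCell board r c > 0)) with
  | none =>
    rw [if_pos (by rw [hv]; omega)]
    have hch : pvColHeight board bh c = 0 := by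
      unfold pvColHeight; rw [List.range_eq_range', hfind]
    have hco : pvContrib board bh c = 0 := by
      unfold pvContrib; rw [hch]; simp
    rw [hch, hco]; simp
  | some r0 =>
    have hr0 : r0 < bh := by
      simpa using List.mem_of_find?_eq_some hfind
    have hch : pvColHeight board bh c = (bh : Int) - (r0 : Int) := by
      unfold pvColHeight; rw [List.range_eq_range', hfind]
    have hget : (hs.set c ((bh : Int) - (r0 : Int))).getD c 0 = (bh : Int) - (r0 : Int) := by
      simp [List.getD, hc]
    rw [if_neg (by rw [hget]; omega)]
    have hco : pvContrib board bh c
        = ((List.range' (r0 + 1) (bh - (r0 + 1))).countP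
            (fun r => decide (pvCell board r c = 0)) : Int) := by
      unfold pvContrib
      rw [hch, if_pos (by omega)]
      unfold pvColHoles
      rw [show (bh : Int) - ((bh : Int) - (r0 : Int)) + 1 = ((r0 + 1 : Nat) : Int) from by
        push_cast; ring]
      have hb := pvCountBridge (r0 + 1) bh (fun r => decide (pvCell board r c = 0)) 0
      simp only [decide_eq_true_eq] at hb
      rw [hb]
      simp
    rw [hch, hco]
    simp

theorem pvOuter (board : List (List Int)) (bh : Nat) :
    ∀ (m k : Nat) (hs : List Int) (holes : Int),
      (∀ c, k ≤ c → c < k + m → hs.getD c 0 = -1 ∧ c < hs.length) →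
      (List.range' k m).foldl (pvStepColA board bh) (hs, holes)
      = ((List.range' k m).foldl (fun h c => h.set c (pvColHeight board bh c)) hs,
         holes + ((List.range' k m).map (pvContrib board bh)).sum) := by
  intro m
  induction m with
  | zero => intro k hs holes _; simp
  | succ m ih =>
    intro k hs holes hinv
    rw [List.range'_succ, List.foldl_cons, List.foldl_cons]
    obtain ⟨hv, hc⟩ := hinv k (le_refl k) (by omega)
    rw [pvColStep board bh k hs holes hc hv]
    rw [ih (k+1) _ _ (by
      intro c h1 h2
      constructor
      · rw [show (hs.set k (pvColHeight board bh k)).getD c 0 = hs.getD c 0 from by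
          simp [List.getD, List.getElem?_set_ne (show k ≠ c from by omega)]]
        exact (hinv c (by omega) (by omega)).1
      · simpa using (hinv c (by omega) (by omega)).2)]
    simp [add_assoc]

theorem pvFoldSetLength (f : Nat → Int) :
    ∀ (m k : Nat) (hs : List Int),
      ((List.range' k m).foldl (fun h c => h.set c (f c)) hs).length = hs.length := by
  intro m
  induction m with
  | zero => intro k hs; simp
  | succ m ih => intro k hs; rw [List.range'_succ, List.foldl_cons, ih]; simp

theorem pvFoldSetGetD (f : Nat → Int) :
    ∀ (m k : Nat) (hs : List Int) (j : Nat), j < hs.length →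
      ((List.range' k m).foldl (fun h c => h.set c (f c)) hs).getD j 0
      = if k ≤ j ∧ j < k + m then f j else hs.getD j 0 := by
  intro m
  induction m with
  | zero => intro k hs j hj; simp
  | succ m ih =>
    intro k hs j hj
    rw [List.range'_succ, List.foldl_cons, ih (k+1) _ j (by simpa using hj)]
    by_cases hjk : j = k
    · subst hjk
      rw [if_neg (by omega), if_pos (by omega)]
      simp [List.getD, hj]
    · rw [show (hs.set k (f k)).getD j 0 = hs.getD j 0 from by
        simp [List.getD, List.getElem?_set_ne (show k ≠ j from fun h => hjk h.symm)]]
      by_cases h1 : k + 1 ≤ j ∧ j < k + 1 + m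
      · rw [if_pos h1, if_pos (by omega)]
      · rw [if_neg h1, if_neg (by omega)]

theorem pvHeightsEq (board : List (List Int)) (bh bw : Nat) :
    (List.range bw).foldl (fun h c => h.set c (pvColHeight board bh c))
      (List.replicate bw (-1 : Int))
    = (List.range bw).map (pvColHeight board bh) := by
  rw [List.range_eq_range']
  apply List.ext_getElem
  · rw [pvFoldSetLength]; simp
  · intro j h1 h2
    have hj : j < bw := by simpa using h2
    have hl : j < (List.replicate bw (-1 : Int)).length := by simpa using hj
    have := pvFoldSetGetD (pvColHeight board bh) bw 0 (List.replicate bw (-1 : Int)) j hl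
    rw [if_pos (by omega)] at this
    rw [← List.getD_eq_getElem _ 0 h1, this]
    simp

theorem pvHolesB (board : List (List Int)) (bh bw : Nat) :
    (List.range bw).foldl
      (fun acc c =>
        let h := ((List.range bw).map (pvColHeight board bh)).getD c 0
        if h > 0 then acc + pvColHoles board bh c h else acc) (0 : Int)
    = ((List.range bw).map (pvContrib board bh)).sum := by
  have : (List.range bw).foldl
      (fun acc c =>
        let h := ((List.range bw).map (pvColHeight board bh)).getD c 0
        if h > 0 then acc + pvColHoles board bh c h else acc) (0 : Int)
      = (List.range bw).foldl (fun acc c => acc + pvContrib board bh c) (0 : Int) := by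
    apply PySem.List.foldl_congr_mem
    intro acc c hcmem
    have hc : c < bw := by simpa using hcmem
    simp only [PySem.List.getD_map_range _ _ _ _ hc]
    unfold pvContrib
    split <;> simp
  rw [this, PySem.List.foldl_add]
  simp

-- ===== VERDICT (by name: the statement is the Claim_ definition above) =====
theorem extract_heights_and_holes_spec : Claim_equal_extract_heights_and_holes := by
  intro board _ _
  unfold Spec_extract_heights_and_holes
  unfold extract_heights_and_holes extract_heights_and_holes_alt
  have hinv : ∀ c, 0 ≤ c → c < 0 + (board.headD []).length →
      (List.replicate (board.headD []).length (-1 : Int)).getD c 0 = -1 ∧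
      c < (List.replicate (board.headD []).length (-1 : Int)).length := by
    intro c _ h2
    refine ⟨List.getD_replicate _ (by omega), by simp only [List.length_replicate]; omega⟩
  have hfold := pvOuter board board.length (board.headD []).length 0
      (List.replicate (board.headD []).length (-1 : Int)) 0 hinv
  rw [← List.range_eq_range'] at hfold
  rw [pvHeightsEq board board.length (board.headD []).length] at hfold
  simp only [hfold, zero_add, pvHolesB board board.length (board.headD []).length]
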